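-- pv_equiv track=rewrite | github.com/sovoo-vader/luiseno-toolkit | app/interlinear_parser.py | parse_interlinear
-- ===== SOURCE A (Python) =====
-- def parse_interlinear(text):
--     """
--     Example format:
--     line1: Luiseño morphemes
--     line2: gloss (English)
--     line3: free English translation
--     """
--     lines = text.strip().split("\n")
--     triples = []
--     for i in range(0, len(lines), 3):
--         if i+2 < len(lines):
--             l1, l2, l3 = lines[i], lines[i+1], lines[i+2]
--             morphemes = l1.split()
--             glosses = l2.split()
--             if len(morphemes) != len(glosses):
--                 glosses += ["-"] * (len(morphemes) - len(glosses))
--             triples.append(list(zip(morphemes, glosses, [l3]*len(morphemes))))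
--     return triples
-- ===== SOURCE B (Python) =====
-- def _pair_tokens(morphemes, glosses, translation):
--     if not morphemes:
--         return []
--     gloss = glosses[0] if glosses else "-"
--     return [(morphemes[0], gloss, translation)] + _pair_tokens(morphemes[1:], glosses[1:], translation)
--
--
-- def parse_interlinear(text):
--     triples = []
--     pending = []
--     for line in text.strip().split("\n"):
--         pending = pending + [line]
--         if len(pending) == 3:
--             l1, l2, l3 = pending
--             triples.append(_pair_tokens(l1.split(), l2.split(), l3))
--             pending = []
--     return triples
-- ===== Notes on version B (the rewrite author's own statement) =====
-- stated objective: alternative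
-- what changed: B streams the lines once through a pending-buffer state machine (emit and reset whenever three lines have accumulated) and builds each row by simultaneous structural recursion over the morpheme and gloss token lists (dash when glosses run out, implicit truncation when morphemes do), replacing A's stride-3 index loop with bounds guard and pad-then-zip.
import Mathlib
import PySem

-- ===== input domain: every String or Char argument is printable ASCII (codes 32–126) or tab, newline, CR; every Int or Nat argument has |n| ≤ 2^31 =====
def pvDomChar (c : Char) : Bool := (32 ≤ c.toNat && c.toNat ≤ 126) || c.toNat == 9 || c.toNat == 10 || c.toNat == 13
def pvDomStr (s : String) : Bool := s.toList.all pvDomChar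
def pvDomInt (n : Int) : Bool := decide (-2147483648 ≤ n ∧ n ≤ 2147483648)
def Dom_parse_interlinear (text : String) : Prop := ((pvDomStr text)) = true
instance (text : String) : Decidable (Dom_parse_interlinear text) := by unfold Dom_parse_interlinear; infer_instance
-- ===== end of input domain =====

-- B streams the lines once through a pending-buffer state machine and pairs morpheme/gloss
-- tokens by simultaneous structural recursion, replacing A's stride-3 index loop with
-- bounds guard and pad-then-zip; same behaviour, alternative decomposition.

-- ===== PORT A =====
-- lines[i] is guarded by i+2 < len(lines), so pyGetD with a dummy default is exact here
def parse_interlinear (text : String) : List (List (String × String × String)) :=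
  let lines := (PySem.Str.split? (PySem.Str.strip text) "\n").getD []
  (PySem.List.pyRange 0 (PySem.List.len lines) 3).foldl
    (fun triples i =>
      if i + 2 < PySem.List.len lines then
        let l1 := PySem.List.pyGetD lines i ""
        let l2 := PySem.List.pyGetD lines (i+1) ""
        let l3 := PySem.List.pyGetD lines (i+2) ""
        let morphemes := PySem.Str.split₀ l1
        let glosses := PySem.Str.split₀ l2
        let glosses := if morphemes.length ≠ glosses.length
          then glosses ++ List.replicate (morphemes.length - glosses.length) "-"
          else glosses
        triples ++ [List.zip morphemes (List.zip glosses (List.replicate morphemes.length l3))]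
      else triples)
    []

-- ===== PORT B =====
-- _pair_tokens: simultaneous structural recursion over morpheme and gloss token lists
def pvPairTokens : List String → List String → String → List (String × String × String)
  | [], _, _ => []
  | m :: ms, [], t => (m, "-", t) :: pvPairTokens ms [] t
  | m :: ms, g :: gs, t => (m, g, t) :: pvPairTokens ms gs t

-- one loop step: append the line to the pending buffer; on a full buffer emit a row and reset
-- (the wildcard match arm is unreachable: the guard makes pending have exactly three elements)
def pvStep (st : List (List (String × String × String)) × List String) (line : String) :
    List (List (String × String × String)) × List String :=
  let pending := st.2 ++ [line]
  if pending.length = 3 then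
    match pending with
    | [l1, l2, l3] =>
        (st.1 ++ [pvPairTokens (PySem.Str.split₀ l1) (PySem.Str.split₀ l2) l3], [])
    | _ => (st.1, [])
  else (st.1, pending)

def parse_interlinear_alt (text : String) : List (List (String × String × String)) :=
  ((((PySem.Str.split? (PySem.Str.strip text) "\n").getD []).foldl pvStep ([], [])).1)

-- ===== PRECONDITION & SPEC =====
def Spec_parse_interlinear (text : String) (out : List (List (String × String × String))) : Prop := out = parse_interlinear_alt text
instance (text : String) (out : List (List (String × String × String))) : Decidable (Spec_parse_interlinear text out) := by unfold Spec_parse_interlinear; infer_instance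

-- ===== CLAIM (what is proved, stated in full; the proofs are below) =====
def Claim_equal_parse_interlinear : Prop := ∀ (text : String), Dom_parse_interlinear text → Spec_parse_interlinear text (parse_interlinear text)

-- ===== LEMMAS AND PROOFS =====

-- canonical intermediate: the complete 3-line groups of the line list
def pvChunk3 : List String → List (String × String × String)
  | a :: b :: c :: rest => (a, b, c) :: pvChunk3 rest
  | _ => []

-- A's row (conditional pad, then zip) equals B's recursive pairing
theorem pvRow_eq (t : String) : ∀ (ms gs : List String),
    List.zip ms
      ((if ms.length ≠ gs.length
          then gs ++ List.replicate (ms.length - gs.length) "-"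
          else gs).zip (List.replicate ms.length t))
    = pvPairTokens ms gs t := by
  have pad : ∀ (ms gs : List String),
      List.zip ms ((gs ++ List.replicate (ms.length - gs.length) "-").zip
        (List.replicate ms.length t)) = pvPairTokens ms gs t := by
    intro ms
    induction ms with
    | nil => intro gs; simp [pvPairTokens]
    | cons m ms ih =>
      intro gs
      cases gs with
      | nil =>
        simp only [List.length_cons, List.length_nil, Nat.sub_zero, List.nil_append,
          List.replicate_succ, List.zip_cons_cons, pvPairTokens]
        exact congrArg _ (by simpa using ih [])
      | cons g gs =>
        simp only [List.length_cons, Nat.succ_sub_succ, List.cons_append,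
          List.replicate_succ, List.zip_cons_cons, pvPairTokens]
        exact congrArg _ (ih gs)
  intro ms gs
  have hif : (if ms.length ≠ gs.length
      then gs ++ List.replicate (ms.length - gs.length) "-"
      else gs) = gs ++ List.replicate (ms.length - gs.length) "-" := by
    split_ifs with h
    · rfl
    · rw [not_ne_iff] at h; simp [h]
  rw [hif]; exact pad ms gs

-- stride-3 range over n+3 elements = 0 then the shifted stride-3 range over n
theorem pvRange3_shift (n : Nat) :
    PySem.List.pyRange 0 ((n : Int) + 3) 3
      = 0 :: (PySem.List.pyRange 0 (n : Int) 3).map (· + 3) := by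
  rw [PySem.List.pyRange_of_pos 0 ((n : Int) + 3) (by norm_num),
      PySem.List.pyRange_of_pos 0 (n : Int) (by norm_num)]
  have h1 : (if (0 : Int) < (n : Int) + 3 then (((n : Int) + 3 - 0 + 3 - 1) / 3).toNat else 0)
      = (n + 5) / 3 := by
    rw [if_pos (by positivity)]
    omega
  have h2 : (if (0 : Int) < (n : Int) then (((n : Int) - 0 + 3 - 1) / 3).toNat else 0)
      = (n + 2) / 3 := by
    split_ifs with h
    · omega
    · omega
  rw [h1, h2]
  have h3 : (n + 5) / 3 = (n + 2) / 3 + 1 := by omega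
  rw [h3, List.range_succ_eq_map]
  simp only [List.map_cons, List.map_map]
  refine congrArg₂ _ (by norm_num) ?_
  refine List.map_congr_left ?_
  intro k _
  simp only [Function.comp_apply]
  push_cast
  ring

-- pyGetD three places down a 3-cons list, for a natural shift
theorem pvGetD_shift3 (a b c : String) (rest : List String) (k : Nat) (d : String) :
    PySem.List.pyGetD (a :: b :: c :: rest) ((k : Int) + 3) d
      = PySem.List.pyGetD rest (k : Int) d := by
  have h : ((k : Int) + 3) = ((k + 3 : Nat) : Int) := by push_cast; ring
  rw [h, PySem.List.pyGetD_natCast, PySem.List.pyGetD_natCast]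
  simp [List.getD]

-- the loop of A, over any list of lines and any accumulator, produces the chunked rows
theorem pvLoopA :
    ∀ (lines : List String) (acc : List (List (String × String × String))),
      (PySem.List.pyRange 0 (PySem.List.len lines) 3).foldl
        (fun triples i =>
          if i + 2 < PySem.List.len lines then
            triples ++ [List.zip (PySem.Str.split₀ (PySem.List.pyGetD lines i ""))
              (List.zip
                (if (PySem.Str.split₀ (PySem.List.pyGetD lines i "")).length ≠
                      (PySem.Str.split₀ (PySem.List.pyGetD lines (i+1) "")).length
                  then PySem.Str.split₀ (PySem.List.pyGetD lines (i+1) "") ++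
                        List.replicate ((PySem.Str.split₀ (PySem.List.pyGetD lines i "")).length -
                          (PySem.Str.split₀ (PySem.List.pyGetD lines (i+1) "")).length) "-"
                  else PySem.Str.split₀ (PySem.List.pyGetD lines (i+1) ""))
                (List.replicate (PySem.Str.split₀ (PySem.List.pyGetD lines i "")).length
                  (PySem.List.pyGetD lines (i+2) "")))]
          else triples)
        acc
      = acc ++ (pvChunk3 lines).map
          (fun g =>
            List.zip (PySem.Str.split₀ g.1)
              (List.zip
                (if (PySem.Str.split₀ g.1).length ≠ (PySem.Str.split₀ g.2.1).length
                  then PySem.Str.split₀ g.2.1 ++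
                        List.replicate ((PySem.Str.split₀ g.1).length -
                          (PySem.Str.split₀ g.2.1).length) "-"
                  else PySem.Str.split₀ g.2.1)
                (List.replicate (PySem.Str.split₀ g.1).length g.2.2)))
  | [], acc => by
      have h : PySem.List.pyRange 0 (0 : Int) 3 = [] := by decide
      simp [PySem.List.len, h, pvChunk3]
  | [a], acc => by
      have h : PySem.List.pyRange 0 (1 : Int) 3 = [0] := by decide
      simp [PySem.List.len, h, pvChunk3]
  | [a, b], acc => by
      have h : PySem.List.pyRange 0 (2 : Int) 3 = [0] := by decide
      simp [PySem.List.len, h, pvChunk3]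
  | a :: b :: c :: rest, acc => by
      have hlr : PySem.List.len rest = (rest.length : Int) := by simp [PySem.List.len]
      have hlen : PySem.List.len (a :: b :: c :: rest) = (rest.length : Int) + 3 := by
        simp [PySem.List.len]; ring
      rw [hlen, pvRange3_shift rest.length, List.foldl_cons, List.foldl_map]
      have hguard0 : ((0 : Int) + 2 < (rest.length : Int) + 3) := by
        have h0 : (0 : Int) ≤ (rest.length : Int) := by positivity
        omega
      rw [if_pos hguard0]
      have hget0 : PySem.List.pyGetD (a :: b :: c :: rest) 0 "" = a := by
        simp [PySem.List.pyGetD]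
      have hget1 : PySem.List.pyGetD (a :: b :: c :: rest) (0 + 1) "" = b := by
        have h : ((0 : Int) + 1) = ((1 : Nat) : Int) := by norm_num
        rw [h, PySem.List.pyGetD_natCast]; rfl
      have hget2 : PySem.List.pyGetD (a :: b :: c :: rest) (0 + 2) "" = c := by
        have h : ((0 : Int) + 2) = ((2 : Nat) : Int) := by norm_num
        rw [h, PySem.List.pyGetD_natCast]; rfl
      rw [hget0, hget1, hget2]
      have hrec := pvLoopA rest
      have hcong := PySem.List.foldl_congr_mem
        (PySem.List.pyRange 0 ((rest.length : Int)) 3)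
        (fun triples i =>
          if i + 3 + 2 < (rest.length : Int) + 3 then
            triples ++ [List.zip (PySem.Str.split₀ (PySem.List.pyGetD (a :: b :: c :: rest) (i+3) ""))
              (List.zip
                (if (PySem.Str.split₀ (PySem.List.pyGetD (a :: b :: c :: rest) (i+3) "")).length ≠
                      (PySem.Str.split₀ (PySem.List.pyGetD (a :: b :: c :: rest) (i+3+1) "")).length
                  then PySem.Str.split₀ (PySem.List.pyGetD (a :: b :: c :: rest) (i+3+1) "") ++
                        List.replicate ((PySem.Str.split₀ (PySem.List.pyGetD (a :: b :: c :: rest) (i+3) "")).length -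
                          (PySem.Str.split₀ (PySem.List.pyGetD (a :: b :: c :: rest) (i+3+1) "")).length) "-"
                  else PySem.Str.split₀ (PySem.List.pyGetD (a :: b :: c :: rest) (i+3+1) ""))
                (List.replicate (PySem.Str.split₀ (PySem.List.pyGetD (a :: b :: c :: rest) (i+3) "")).length
                  (PySem.List.pyGetD (a :: b :: c :: rest) (i+3+2) "")))]
          else triples)
        (fun triples i =>
          if i + 2 < PySem.List.len rest then
            triples ++ [List.zip (PySem.Str.split₀ (PySem.List.pyGetD rest i ""))
              (List.zip
                (if (PySem.Str.split₀ (PySem.List.pyGetD rest i "")).length ≠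
                      (PySem.Str.split₀ (PySem.List.pyGetD rest (i+1) "")).length
                  then PySem.Str.split₀ (PySem.List.pyGetD rest (i+1) "") ++
                        List.replicate ((PySem.Str.split₀ (PySem.List.pyGetD rest i "")).length -
                          (PySem.Str.split₀ (PySem.List.pyGetD rest (i+1) "")).length) "-"
                  else PySem.Str.split₀ (PySem.List.pyGetD rest (i+1) ""))
                (List.replicate (PySem.Str.split₀ (PySem.List.pyGetD rest i "")).length
                  (PySem.List.pyGetD rest (i+2) "")))]
          else triples)
        (acc ++ [List.zip (PySem.Str.split₀ a)
          (List.zip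
            (if (PySem.Str.split₀ a).length ≠ (PySem.Str.split₀ b).length
              then PySem.Str.split₀ b ++
                    List.replicate ((PySem.Str.split₀ a).length - (PySem.Str.split₀ b).length) "-"
              else PySem.Str.split₀ b)
            (List.replicate (PySem.Str.split₀ a).length c))])
        ?_
      · rw [hcong]
        rw [← hlr]
        rw [hrec]
        simp [pvChunk3]
      · intro acc' i hi
        have hi' := (PySem.List.mem_pyRange_iff_of_pos (by norm_num) i).mp hi
        obtain ⟨k, rfl⟩ := Int.eq_ofNat_of_zero_le hi'.1
        dsimp only
        have hg : (((k : Int) + 3 + 2 < (rest.length : Int) + 3)) ↔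
            ((k : Int) + 2 < PySem.List.len rest) := by
          rw [hlr]; omega
        have e1 : ((k : Int) + 3 + 1) = ((k : Int) + 1) + 3 := by ring
        have e2 : ((k : Int) + 3 + 2) = ((k : Int) + 2) + 3 := by ring
        by_cases hc : ((k : Int) + 2 < PySem.List.len rest)
        · rw [if_pos (hg.mpr hc), if_pos hc, e1, e2]
          have g1 := pvGetD_shift3 a b c rest k ""
          have g2 : PySem.List.pyGetD (a :: b :: c :: rest) ((k : Int) + 1 + 3) ""
              = PySem.List.pyGetD rest ((k : Int) + 1) "" := by
            have h : ((k : Int) + 1) = ((k + 1 : Nat) : Int) := by push_cast; ring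
            rw [h]; exact pvGetD_shift3 a b c rest (k + 1) ""
          have g3 : PySem.List.pyGetD (a :: b :: c :: rest) ((k : Int) + 2 + 3) ""
              = PySem.List.pyGetD rest ((k : Int) + 2) "" := by
            have h : ((k : Int) + 2) = ((k + 2 : Nat) : Int) := by push_cast; ring
            rw [h]; exact pvGetD_shift3 a b c rest (k + 2) ""
          rw [g1, g2, g3]
        · rw [if_neg (fun h => hc (hg.mp h)), if_neg hc]

-- the state-machine fold of B, started on an empty pending buffer, produces the chunked rows
theorem pvLoopB :
    ∀ (lines : List String) (acc : List (List (String × String × String))),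
      lines.foldl pvStep (acc, [])
      = (acc ++ (pvChunk3 lines).map
          (fun g => pvPairTokens (PySem.Str.split₀ g.1) (PySem.Str.split₀ g.2.1) g.2.2),
         lines.drop (3 * (pvChunk3 lines).length))
  | [], acc => by simp [pvChunk3]
  | [a], acc => by simp [pvChunk3, pvStep]
  | [a, b], acc => by simp [pvChunk3, pvStep]
  | a :: b :: c :: rest, acc => by
      have h1 : pvStep (acc, []) a = (acc, [a]) := by simp [pvStep]
      have h2 : pvStep (acc, [a]) b = (acc, [a, b]) := by simp [pvStep]
      have h3 : pvStep (acc, [a, b]) c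
          = (acc ++ [pvPairTokens (PySem.Str.split₀ a) (PySem.Str.split₀ b) c], []) := by
        simp [pvStep]
      rw [List.foldl_cons, h1, List.foldl_cons, h2, List.foldl_cons, h3, pvLoopB rest]
      simp [pvChunk3, Nat.mul_succ]

-- ===== VERDICT (by name: the statement is the Claim_ definition above) =====
theorem parse_interlinear_spec : Claim_equal_parse_interlinear := by
  intro text _
  unfold Spec_parse_interlinear parse_interlinear parse_interlinear_alt
  rw [pvLoopA, pvLoopB]
  simp only [List.nil_append]
  refine List.map_congr_left ?_
  intro g _
  exact pvRow_eq g.2.2 (PySem.Str.split₀ g.1) (PySem.Str.split₀ g.2.1)
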